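-- pv_equiv track=rewrite | github.com/rastanton/cgMLST_Scripts | General_cgMLST_Parallel.py | Matrix_Maker
-- ===== SOURCE A (Python) =====
-- import math
--
-- def List_Matrix(length):
--     Out = []
--     Length = int(math.sqrt(length * 2))
--     New = []
--     for entry in range(Length):
--         New.append(entry)
--     Out.append(New)
--     for entry in range(1, Length):
--         New = []
--         for entry2 in range(Length):
-- ##            if (entry2) == 0:
-- ##                New.append(entry)
--             if entry2 < entry:
--                 New.append(Out[entry2][entry])
--             elif entry == entry2:
--                 New.append(Out[entry - 1][-1] + 1)
--             else:
--                 New.append(New[-1] + 1)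
--         Out.append(New)
--     return Out
--
-- def Matrix_Maker(input_list):
--     Matches = List_Matrix(len(input_list))
--     Out = []
--     for entry in Matches:
--         New = []
--         for entry2 in entry:
--             New.append(input_list[entry2])
--         Out.append(New)
--     return Out
-- ===== SOURCE B (Python) =====
-- import math
--
-- def Matrix_Maker(input_list):
--     Length = int(math.sqrt(len(input_list) * 2))
--
--     def idx(i, j):
--         a, b = (i, j) if i <= j else (j, i)
--         return a * Length - a * (a - 1) // 2 + (b - a)
--
--     Out = [[input_list[j] for j in range(Length)]]
--     for i in range(1, Length):
--         Out.append([input_list[idx(i, j)] for j in range(Length)])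
--     return Out
-- ===== Notes on version B (the rewrite author's own statement) =====
-- stated objective: simpler
-- what changed: B computes each triangular index directly by the closed form a*L - a*(a-1)//2 + (b-a) instead of first materialising an index matrix cell-by-cell from previously filled cells and then mapping over it.
import Mathlib
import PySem

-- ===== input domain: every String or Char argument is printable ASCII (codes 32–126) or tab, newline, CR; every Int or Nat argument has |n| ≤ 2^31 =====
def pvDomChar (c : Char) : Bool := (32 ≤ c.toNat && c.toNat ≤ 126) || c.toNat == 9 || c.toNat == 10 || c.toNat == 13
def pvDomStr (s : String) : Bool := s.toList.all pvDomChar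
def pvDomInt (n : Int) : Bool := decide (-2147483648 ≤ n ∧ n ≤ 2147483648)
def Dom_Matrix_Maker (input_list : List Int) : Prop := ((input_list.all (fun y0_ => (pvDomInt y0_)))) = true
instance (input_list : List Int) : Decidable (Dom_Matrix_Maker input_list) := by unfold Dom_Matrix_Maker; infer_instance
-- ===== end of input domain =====

-- B replaces A's cell-by-cell index-matrix construction by a closed-form triangular index (simpler; same cost).

-- ===== PORT A =====
-- Python's int(math.sqrt(length * 2)) is the exact integer square root on this domain
-- (lengths far below 2^52); pyISqrt computes it (largest k with k*k ≤ n), kernel-reducible.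
def pyISqrt (n : Nat) : Nat :=
  (List.range (n + 1)).foldl (fun acc k => if k * k ≤ n then k else acc) 0

def List_Matrix (length : Nat) : List (List Int) :=
  let Length := pyISqrt (length * 2)
  let New := (List.range Length).foldl (fun acc (entry : Nat) => acc ++ [(entry : Int)]) ([] : List Int)
  let Out := [New]
  (List.range' 1 (Length - 1)).foldl (fun Out (entry : Nat) =>
    Out ++ [(List.range Length).foldl (fun New (entry2 : Nat) =>
      New ++ [ if entry2 < entry then
                 (PySem.List.pyGet? ((PySem.List.pyGet? Out (entry2 : Int)).getD []) (entry : Int)).getD 0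
               else if entry2 = entry then
                 ((PySem.List.pyGet? ((PySem.List.pyGet? Out ((entry : Int) - 1)).getD []) (-1)).getD 0) + 1
               else
                 ((PySem.List.pyGet? New (-1)).getD 0) + 1 ]) []]) Out

def Matrix_Maker (input_list : List Int) : List (List Int) :=
  let Matches := List_Matrix input_list.length
  Matches.foldl (fun Out entry =>
    Out ++ [entry.foldl (fun New entry2 =>
      New ++ [(PySem.List.pyGet? input_list entry2).getD 0]) []]) []

-- ===== PORT B =====
def bIdx (Length : Nat) (i j : Nat) : Int :=
  let a : Int := if i ≤ j then (i : Int) else (j : Int)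
  let b : Int := if i ≤ j then (j : Int) else (i : Int)
  a * (Length : Int) - PySem.Int.floordiv (a * (a - 1)) 2 + (b - a)

def Matrix_Maker_alt (input_list : List Int) : List (List Int) :=
  let Length := pyISqrt (input_list.length * 2)
  let Out := [(List.range Length).map (fun (j : Nat) => (PySem.List.pyGet? input_list (j : Int)).getD 0)]
  (List.range' 1 (Length - 1)).foldl (fun Out (i : Nat) =>
    Out ++ [(List.range Length).map (fun (j : Nat) => (PySem.List.pyGet? input_list (bIdx Length i j)).getD 0)]) Out

-- ===== PRECONDITION & SPEC =====
-- Pre_ excludes exactly the lengths on which Python A raises IndexError: the list must hold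
-- the full upper triangle (L*(L+1)/2 entries) for L = isqrt(2*len).
def Pre_Matrix_Maker (input_list : List Int) : Prop :=
  pyISqrt (input_list.length * 2) * (pyISqrt (input_list.length * 2) + 1) / 2 ≤ input_list.length
instance (input_list : List Int) : Decidable (Pre_Matrix_Maker input_list) := by unfold Pre_Matrix_Maker; infer_instance
def pvWitness_Matrix_Maker : List Int := [1, 2, 3]

def Spec_Matrix_Maker (input_list : List Int) (out : List (List Int)) : Prop := out = Matrix_Maker_alt input_list
instance (input_list : List Int) (out : List (List Int)) : Decidable (Spec_Matrix_Maker input_list out) := by unfold Spec_Matrix_Maker; infer_instance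

-- ===== CLAIM (what is proved, stated in full; the proofs are below) =====
def Claim_equal_Matrix_Maker : Prop := ∀ (input_list : List Int), Dom_Matrix_Maker input_list → Pre_Matrix_Maker input_list → Spec_Matrix_Maker input_list (Matrix_Maker input_list)

-- ===== LEMMAS AND PROOFS =====

-- foldl-append is map
theorem foldl_append_eq_map {α β : Type} (g : α → β) (xs : List α) (init : List β) :
    xs.foldl (fun acc x => acc ++ [g x]) init = init ++ xs.map g := by
  induction xs generalizing init with
  | nil => simp
  | cons x xs ih => simp [List.foldl_cons, ih]

-- triangular numbers, used to evaluate the floordiv in bIdx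
def triI : Nat → Int
  | 0 => 0
  | n + 1 => triI n + n

theorem two_triI (m : Nat) : (m : Int) * ((m : Int) - 1) = 2 * triI m := by
  induction m with
  | zero => simp [triI]
  | succ n ih => push_cast [triI]; linarith [ih]

theorem floordiv_triI (m : Nat) :
    PySem.Int.floordiv ((m : Int) * ((m : Int) - 1)) 2 = triI m := by
  rw [two_triI, PySem.Int.floordiv_eq_ediv_of_pos (by omega)]
  omega

theorem bIdx_eval (L i j : Nat) (h : i ≤ j) :
    bIdx L i j = (i : Int) * L - triI i + ((j : Int) - i) := by
  simp only [bIdx, if_pos h, floordiv_triI]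

theorem bIdx_symm (L i j : Nat) : bIdx L j i = bIdx L i j := by
  rcases Nat.lt_or_ge i j with h' | h'
  · simp only [bIdx, if_pos (by omega : i ≤ j), if_neg (by omega : ¬ j ≤ i)]
  · rcases Nat.lt_or_ge j i with h'' | h''
    · simp only [bIdx, if_pos (by omega : j ≤ i), if_neg (by omega : ¬ i ≤ j)]
    · have : i = j := by omega
      subst this; rfl

theorem bIdx_succ (L i k : Nat) (h : i ≤ k) : bIdx L i (k + 1) = bIdx L i k + 1 := by
  rw [bIdx_eval L i (k+1) (by omega), bIdx_eval L i k h]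
  push_cast; ring

theorem bIdx_diag (L i : Nat) (h1 : 1 ≤ i) (h2 : i < L) :
    bIdx L i i = bIdx L (i - 1) (L - 1) + 1 := by
  obtain ⟨m, rfl⟩ : ∃ m, i = m + 1 := ⟨i - 1, by omega⟩
  rw [bIdx_eval L (m+1) (m+1) le_rfl, bIdx_eval L ((m+1)-1) (L-1) (by omega)]
  simp only [Nat.add_sub_cancel, triI]
  have hL : ((L - 1 : Nat) : Int) = (L : Int) - 1 := by omega
  rw [hL]; push_cast; ring

theorem bIdx_zero (L j : Nat) : bIdx L 0 j = (j : Int) := by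
  rw [bIdx_eval L 0 j (Nat.zero_le j)]
  simp [triI]

-- the row of triangular indices
def rowB (L i : Nat) : List Int := (List.range L).map (fun j => bIdx L i j)

theorem rowB_get (L r i : Nat) (h : i < L) :
    (PySem.List.pyGet? (rowB L r) (i : Int)).getD 0 = bIdx L r i := by
  simp [rowB, h]

theorem rowB_last (L r : Nat) (h : 0 < L) :
    (PySem.List.pyGet? (rowB L r) (-1)).getD 0 = bIdx L r (L - 1) := by
  rw [PySem.List.pyGet?_neg_one]
  have hL : List.range L = List.range (L - 1) ++ [L - 1] := by
    conv_lhs => rw [show L = (L - 1) + 1 by omega]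
    exact List.range_succ
  simp [rowB, hL]

theorem rows_get (L i k : Nat) (h : k < i) :
    PySem.List.pyGet? ((List.range i).map (rowB L)) (k : Int) = some (rowB L k) := by
  simp [h]

-- inner loop of A builds rowB L i, given previously built rows 0..i-1
theorem innerA (L i : Nat) (h1 : 1 ≤ i) (h2 : i < L) (k : Nat) (hk : k ≤ L) :
    (List.range k).foldl (fun New (entry2 : Nat) =>
      New ++ [ if entry2 < i then
                 (PySem.List.pyGet? ((PySem.List.pyGet? ((List.range i).map (rowB L)) (entry2 : Int)).getD []) (i : Int)).getD 0
               else if entry2 = i then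
                 ((PySem.List.pyGet? ((PySem.List.pyGet? ((List.range i).map (rowB L)) ((i : Int) - 1)).getD []) (-1)).getD 0) + 1
               else
                 ((PySem.List.pyGet? New (-1)).getD 0) + 1 ]) [] = (List.range k).map (fun j => bIdx L i j) := by
  induction k with
  | zero => simp
  | succ k ih =>
    rw [List.range_succ, List.foldl_append, List.map_append, ih (by omega)]
    simp only [List.foldl_cons, List.foldl_nil, List.map_cons, List.map_nil]
    congr 1
    congr 1
    by_cases hlt : k < i
    · simp only [if_pos hlt]
      rw [rows_get L i k hlt]
      simp only [Option.getD_some]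
      rw [rowB_get L k i h2, bIdx_symm]
    · by_cases heq : k = i
      · simp only [if_neg hlt, if_pos heq]
        subst heq
        have hc : ((k : Int) - 1) = (((k - 1 : Nat)) : Int) := by omega
        rw [hc, rows_get L k (k - 1) (by omega)]
        simp only [Option.getD_some]
        rw [rowB_last L (k - 1) (by omega)]
        exact (bIdx_diag L k h1 h2).symm
      · simp only [if_neg hlt, if_neg heq]
        have hk1 : List.range k = List.range (k - 1) ++ [k - 1] := by
          conv_lhs => rw [show k = (k - 1) + 1 by omega]
          exact List.range_succ
        rw [hk1, List.map_append]
        simp only [List.map_cons, List.map_nil, PySem.List.pyGet?_neg_one_append_singleton, Option.getD_some]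
        have : bIdx L i k = bIdx L i (k - 1) + 1 := by
          have h3 := bIdx_succ L i (k - 1) (by omega)
          rwa [show k - 1 + 1 = k by omega] at h3
        rw [this]

-- the full index matrix built by A
theorem List_Matrix_char (n : Nat) (h : 1 ≤ pyISqrt (n * 2)) :
    List_Matrix n = (List.range (pyISqrt (n * 2))).map (rowB (pyISqrt (n * 2))) := by
  set L := pyISqrt (n * 2) with hLdef
  unfold List_Matrix
  rw [← hLdef]
  simp only []
  have base : (List.range L).foldl (fun acc (entry : Nat) => acc ++ [(entry : Int)]) ([] : List Int) = rowB L 0 := by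
    rw [foldl_append_eq_map (fun entry : Nat => (entry : Int)) (List.range L) ([] : List Int)]
    simp only [List.nil_append, rowB]
    exact (List.map_congr_left (fun j _ => (bIdx_zero L j).symm))
  rw [base]
  -- outer loop: after processing rows 1..m, Out = rows 0..m
  have outer : ∀ m, m ≤ L - 1 →
      (List.range' 1 m).foldl (fun Out (entry : Nat) =>
        Out ++ [(List.range L).foldl (fun New (entry2 : Nat) =>
          New ++ [ if entry2 < entry then
                     (PySem.List.pyGet? ((PySem.List.pyGet? Out (entry2 : Int)).getD []) (entry : Int)).getD 0
                   else if entry2 = entry then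
                     ((PySem.List.pyGet? ((PySem.List.pyGet? Out ((entry : Int) - 1)).getD []) (-1)).getD 0) + 1
                   else
                     ((PySem.List.pyGet? New (-1)).getD 0) + 1 ]) []]) [rowB L 0]
      = (List.range (m + 1)).map (rowB L) := by
    intro m hm
    induction m with
    | zero => simp
    | succ m ih =>
      rw [List.range'_concat, List.foldl_append, ih (by omega)]
      simp only [List.foldl_cons, List.foldl_nil]
      rw [show 1 + 1 * m = m + 1 by omega]
      rw [innerA L (m + 1) (by omega) (by omega) L le_rfl]
      rw [show List.range (m + 1 + 1) = List.range (m + 1) ++ [m + 1] from List.range_succ]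
      simp [rowB]
  have hfin := outer (L - 1) le_rfl
  rw [show L - 1 + 1 = L by omega] at hfin
  exact hfin

theorem Matrix_Maker_eq (input_list : List Int) :
    Matrix_Maker input_list = Matrix_Maker_alt input_list := by
  set L := pyISqrt (input_list.length * 2) with hLdef
  by_cases hL : 1 ≤ L
  · unfold Matrix_Maker
    rw [List_Matrix_char input_list.length (hLdef ▸ hL)]
    rw [← hLdef, foldl_append_eq_map]
    simp only [List.nil_append, List.map_map]
    unfold Matrix_Maker_alt
    rw [← hLdef]
    simp only []
    rw [foldl_append_eq_map]
    have hrange : List.range L = 0 :: List.range' 1 (L - 1) := by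
      rw [List.range_eq_range', show L = (L - 1) + 1 by omega, List.range'_succ]
      norm_num
    conv_lhs => rw [hrange]
    simp only [List.map_cons, Function.comp_def]
    congr 1
    · rw [foldl_append_eq_map]
      simp only [List.nil_append, rowB, List.map_map, Function.comp_def]
      refine List.map_congr_left (fun j _ => ?_)
      rw [bIdx_zero]
    · exact List.map_congr_left (fun i _ => by
        rw [foldl_append_eq_map]
        simp [rowB, List.map_map, Function.comp_def])
  · -- L = 0 : both return [[]]
    have hL0 : L = 0 := by omega
    unfold Matrix_Maker Matrix_Maker_alt List_Matrix
    rw [← hLdef, hL0]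
    simp

-- ===== VERDICT (by name: the statement is the Claim_ definition above) =====
theorem Matrix_Maker_spec : Claim_equal_Matrix_Maker := by
  intro input_list _ _
  unfold Spec_Matrix_Maker
  exact Matrix_Maker_eq input_list
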